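-- pv_equiv track=rewrite | github.com/BethanyCoulson/AdventOfCode | 2024/Day2/day2.py | part1
-- ===== SOURCE A (Python) =====
-- def part1(reports):
--     total_safe = 0
--     for report in reports:
--         report_safe = all(i < j for i, j in zip(report, report[1:])) or all(i > j for i, j in zip(report, report[1:])) # Checks if list is strictly increasing or decreasing
--         if report_safe:
--             for i, j in zip(report, report[1:]):
--                 if not (1 <= abs(i - j) <= 3): # Checks if report meets >0 <=3 constraint
--                     report_safe = False
--                     break
--         if report_safe:
--             total_safe += 1
--     return total_safe
-- ===== SOURCE B (Python) =====
-- def part1(reports):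
--     total = 0
--     for report in reports:
--         if len(report) < 2:
--             total += 1
--             continue
--         # one pass maintaining only the extreme adjacent differences
--         mn = mx = report[1] - report[0]
--         for a, b in zip(report[1:], report[2:]):
--             d = b - a
--             if d < mn:
--                 mn = d
--             if d > mx:
--                 mx = d
--         # safe iff every diff lies in [1,3] or every diff lies in [-3,-1],
--         # which depends only on the extremes
--         if (1 <= mn and mx <= 3) or (-3 <= mn and mx <= -1):
--             total += 1
--     return total
-- ===== Notes on version B (the rewrite author's own statement) =====
-- stated objective: alternative
-- what changed: B replaces A's two strict-monotonicity all() scans plus a magnitude loop with break by a single pass that maintains only the minimum and maximum adjacent difference, then decides safety with one O(1) arithmetic test on those two extremes.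
import Mathlib
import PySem

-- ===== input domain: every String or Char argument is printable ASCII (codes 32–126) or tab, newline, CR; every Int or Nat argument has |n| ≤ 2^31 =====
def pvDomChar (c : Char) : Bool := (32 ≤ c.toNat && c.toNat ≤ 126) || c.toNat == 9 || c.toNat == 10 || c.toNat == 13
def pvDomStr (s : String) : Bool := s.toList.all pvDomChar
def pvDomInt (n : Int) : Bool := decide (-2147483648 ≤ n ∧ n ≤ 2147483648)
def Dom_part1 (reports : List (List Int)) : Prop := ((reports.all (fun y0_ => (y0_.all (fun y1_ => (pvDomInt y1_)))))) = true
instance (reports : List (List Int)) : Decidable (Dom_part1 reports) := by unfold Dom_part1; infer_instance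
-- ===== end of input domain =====

-- B keeps only the min and max adjacent difference per report and decides safety by one arithmetic test; objective: alternative.

-- ===== PORT A =====
-- the inner 'for i, j in zip(report, report[1:]): if not (1 <= abs(i-j) <= 3): report_safe = False; break'
def part1_magLoop : List (Int × Int) → Bool
  | [] => true
  | (i, j) :: rest =>
      if ¬ (1 ≤ |i - j| ∧ |i - j| ≤ 3) then false else part1_magLoop rest

def part1 (reports : List (List Int)) : Int :=
  reports.foldl (fun total_safe report =>
    -- report[1:] is report.drop 1 (exact for slice [1:])
    let z := report.zip (report.drop 1)
    let report_safe := z.all (fun p => decide (p.1 < p.2)) || z.all (fun p => decide (p.1 > p.2))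
    let report_safe := if report_safe then part1_magLoop z else report_safe
    if report_safe then total_safe + 1 else total_safe) 0

-- ===== PORT B =====
-- 'for a, b in zip(report[1:], report[2:]): d = b - a; if d < mn: mn = d; if d > mx: mx = d'
def part1_alt_bounds (mn mx : Int) : List (Int × Int) → Int × Int
  | [] => (mn, mx)
  | (a, b) :: rest =>
      let d := b - a
      let mn := if d < mn then d else mn
      let mx := if d > mx then d else mx
      part1_alt_bounds mn mx rest

def part1_alt (reports : List (List Int)) : Int :=
  reports.foldl (fun total report =>
    match report with
    | [] => total + 1          -- len(report) < 2
    | [_] => total + 1         -- len(report) < 2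
    | r0 :: r1 :: rest =>
        let d0 := r1 - r0
        let (mn, mx) := part1_alt_bounds d0 d0 ((r1 :: rest).zip rest)  -- zip(report[1:], report[2:])
        if (1 ≤ mn ∧ mx ≤ 3) ∨ (-3 ≤ mn ∧ mx ≤ -1) then total + 1 else total) 0

-- ===== PRECONDITION & SPEC =====
def Spec_part1 (reports : List (List Int)) (out : Int) : Prop := out = part1_alt reports
instance (reports : List (List Int)) (out : Int) : Decidable (Spec_part1 reports out) := by unfold Spec_part1; infer_instance

-- ===== CLAIM (what is proved, stated in full; the proofs are below) =====
def Claim_equal_part1 : Prop := ∀ (reports : List (List Int)), Dom_part1 reports → Spec_part1 reports (part1 reports)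

-- ===== LEMMAS AND PROOFS =====

lemma magLoop_eq_all (z : List (Int × Int)) :
    part1_magLoop z = z.all (fun p => decide (1 ≤ |p.1 - p.2| ∧ |p.1 - p.2| ≤ 3)) := by
  induction z with
  | nil => rfl
  | cons p rest ih =>
      obtain ⟨i, j⟩ := p
      simp only [part1_magLoop, List.all_cons]
      by_cases h : 1 ≤ |i - j| ∧ |i - j| ≤ 3 <;> simp [h, ih]

-- A's per-report boolean in terms of diff bounds
lemma aSafe_iff (z : List (Int × Int)) :
    ((if (z.all (fun p => decide (p.1 < p.2)) || z.all (fun p => decide (p.1 > p.2))) then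
        part1_magLoop z
      else (z.all (fun p => decide (p.1 < p.2)) || z.all (fun p => decide (p.1 > p.2)))) = true)
    ↔ ((∀ p ∈ z, 1 ≤ p.2 - p.1 ∧ p.2 - p.1 ≤ 3) ∨ (∀ p ∈ z, -3 ≤ p.2 - p.1 ∧ p.2 - p.1 ≤ -1)) := by
  by_cases hb : (z.all (fun p => decide (p.1 < p.2)) || z.all (fun p => decide (p.1 > p.2))) = true
  · rw [if_pos hb, magLoop_eq_all]
    rcases Bool.or_eq_true_iff.mp hb with h | h <;>
      simp only [List.all_eq_true, decide_eq_true_eq, gt_iff_lt] at h <;>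
      simp only [List.all_eq_true, decide_eq_true_eq] <;> constructor
    · intro hm
      exact Or.inl fun p hp => by
        have := h p hp; have := hm p hp
        rcases abs_cases (p.1 - p.2) with ⟨ha, _⟩ | ⟨ha, _⟩ <;> omega
    · rintro (hd | hd) p hp <;>
        (have := hd p hp; rcases abs_cases (p.1 - p.2) with ⟨ha, _⟩ | ⟨ha, _⟩ <;>
          omega)
    · intro hm
      exact Or.inr fun p hp => by
        have := h p hp; have := hm p hp
        rcases abs_cases (p.1 - p.2) with ⟨ha, _⟩ | ⟨ha, _⟩ <;> omega
    · rintro (hd | hd) p hp <;>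
        (have := hd p hp; rcases abs_cases (p.1 - p.2) with ⟨ha, _⟩ | ⟨ha, _⟩ <;>
          omega)
  · rw [if_neg hb]
    have hb' := hb
    simp only [Bool.or_eq_true_iff, not_or, List.all_eq_true, decide_eq_true_eq] at hb'
    obtain ⟨h1, h2⟩ := hb'
    push Not at h1 h2
    obtain ⟨p, hp, hlt⟩ := h1
    obtain ⟨q, hq, hgt⟩ := h2
    constructor
    · intro h; exact absurd h hb
    · rintro (hd | hd)
      · have := hd p hp; omega
      · have := hd q hq; omega

-- B's fold computes exactly the bound characterisations
lemma bounds_fst_le (c mn mx : Int) (l : List (Int × Int)) :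
    (c ≤ (part1_alt_bounds mn mx l).1) ↔ (c ≤ mn ∧ ∀ q ∈ l, c ≤ q.2 - q.1) := by
  induction l generalizing mn mx with
  | nil => simp [part1_alt_bounds]
  | cons q rest ih =>
      obtain ⟨a, b⟩ := q
      simp only [part1_alt_bounds, List.mem_cons]
      rw [ih]
      constructor
      · rintro ⟨h1, h2⟩
        refine ⟨?_, fun q hq => ?_⟩ <;> [skip; rcases hq with rfl | hq] <;>
          first | (split_ifs at h1 <;> omega) | exact h2 _ hq
      · rintro ⟨h1, h2⟩
        have hd := h2 (a, b) (Or.inl rfl)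
        exact ⟨by split_ifs <;> simpa using by omega, fun q hq => h2 q (Or.inr hq)⟩

lemma bounds_snd_le (c mn mx : Int) (l : List (Int × Int)) :
    ((part1_alt_bounds mn mx l).2 ≤ c) ↔ (mx ≤ c ∧ ∀ q ∈ l, q.2 - q.1 ≤ c) := by
  induction l generalizing mn mx with
  | nil => simp [part1_alt_bounds]
  | cons q rest ih =>
      obtain ⟨a, b⟩ := q
      simp only [part1_alt_bounds, List.mem_cons]
      rw [ih]
      constructor
      · rintro ⟨h1, h2⟩
        refine ⟨?_, fun q hq => ?_⟩ <;> [skip; rcases hq with rfl | hq] <;>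
          first | (split_ifs at h1 <;> omega) | exact h2 _ hq
      · rintro ⟨h1, h2⟩
        have hd := h2 (a, b) (Or.inl rfl)
        exact ⟨by split_ifs <;> simpa using by omega, fun q hq => h2 q (Or.inr hq)⟩

-- per-report agreement of the two step functions
lemma step_eq (r : List Int) (acc : Int) :
    (let z := r.zip (r.drop 1)
     let report_safe := z.all (fun p => decide (p.1 < p.2)) || z.all (fun p => decide (p.1 > p.2))
     let report_safe := if report_safe then part1_magLoop z else report_safe
     if report_safe then acc + 1 else acc)
    = (match r with
       | [] => acc + 1
       | [_] => acc + 1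
       | r0 :: r1 :: rest =>
           let d0 := r1 - r0
           let (mn, mx) := part1_alt_bounds d0 d0 ((r1 :: rest).zip rest)
           if (1 ≤ mn ∧ mx ≤ 3) ∨ (-3 ≤ mn ∧ mx ≤ -1) then acc + 1 else acc) := by
  match r with
  | [] => rfl
  | [x] => rfl
  | r0 :: r1 :: rs =>
      rcases h : part1_alt_bounds (r1 - r0) (r1 - r0) ((r1 :: rs).zip rs) with ⟨mn, mx⟩
      have hfst : ∀ c : Int, c ≤ mn ↔ (c ≤ r1 - r0 ∧ ∀ q ∈ (r1 :: rs).zip rs, c ≤ q.2 - q.1) := by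
        intro c
        have hm : (part1_alt_bounds (r1 - r0) (r1 - r0) ((r1 :: rs).zip rs)).1 = mn := by rw [h]
        rw [← hm]; exact bounds_fst_le c _ _ _
      have hsnd : ∀ c : Int, mx ≤ c ↔ (r1 - r0 ≤ c ∧ ∀ q ∈ (r1 :: rs).zip rs, q.2 - q.1 ≤ c) := by
        intro c
        have hm : (part1_alt_bounds (r1 - r0) (r1 - r0) ((r1 :: rs).zip rs)).2 = mx := by rw [h]
        rw [← hm]; exact bounds_snd_le c _ _ _
      have hz : (r0 :: r1 :: rs).zip ((r0 :: r1 :: rs).drop 1)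
          = (r0, r1) :: ((r1 :: rs).zip rs) := by simp
      have hiff := aSafe_iff ((r0, r1) :: ((r1 :: rs).zip rs))
      have hcond : ((∀ p ∈ (r0, r1) :: ((r1 :: rs).zip rs), 1 ≤ p.2 - p.1 ∧ p.2 - p.1 ≤ 3)
            ∨ (∀ p ∈ (r0, r1) :: ((r1 :: rs).zip rs), -3 ≤ p.2 - p.1 ∧ p.2 - p.1 ≤ -1))
          ↔ ((1 ≤ mn ∧ mx ≤ 3) ∨ (-3 ≤ mn ∧ mx ≤ -1)) := by
        simp only [List.forall_mem_cons, hfst, hsnd]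
        constructor
        · rintro (⟨⟨h1, h2⟩, h3⟩ | ⟨⟨h1, h2⟩, h3⟩)
          · exact Or.inl ⟨⟨h1, fun q hq => (h3 q hq).1⟩, h2, fun q hq => (h3 q hq).2⟩
          · exact Or.inr ⟨⟨h1, fun q hq => (h3 q hq).1⟩, h2, fun q hq => (h3 q hq).2⟩
        · rintro (⟨⟨h1, h2⟩, h3, h4⟩ | ⟨⟨h1, h2⟩, h3, h4⟩)
          · exact Or.inl ⟨⟨h1, h3⟩, fun q hq => ⟨h2 q hq, h4 q hq⟩⟩
          · exact Or.inr ⟨⟨h1, h3⟩, fun q hq => ⟨h2 q hq, h4 q hq⟩⟩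
      simp only [hz, h]
      by_cases hc : (1 ≤ mn ∧ mx ≤ 3) ∨ (-3 ≤ mn ∧ mx ≤ -1)
      · simp only [hiff.mpr (hcond.mpr hc), hc, if_true]
      · have hA : ¬ _ := fun hh => hc (hcond.mp (hiff.mp hh))
        simp only [hc, if_false, hA]

lemma foldl_eq (reports : List (List Int)) (acc : Int) :
    reports.foldl (fun total_safe report =>
      let z := report.zip (report.drop 1)
      let report_safe := z.all (fun p => decide (p.1 < p.2)) || z.all (fun p => decide (p.1 > p.2))
      let report_safe := if report_safe then part1_magLoop z else report_safe
      if report_safe then total_safe + 1 else total_safe) acc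
    = reports.foldl (fun total report =>
        match report with
        | [] => total + 1
        | [_] => total + 1
        | r0 :: r1 :: rest =>
            let d0 := r1 - r0
            let (mn, mx) := part1_alt_bounds d0 d0 ((r1 :: rest).zip rest)
            if (1 ≤ mn ∧ mx ≤ 3) ∨ (-3 ≤ mn ∧ mx ≤ -1) then total + 1 else total) acc := by
  induction reports generalizing acc with
  | nil => rfl
  | cons r rest ih =>
      rw [List.foldl_cons, List.foldl_cons, ih, step_eq]

-- ===== VERDICT (by name: the statement is the Claim_ definition above) =====
theorem part1_spec : Claim_equal_part1 := by
  intro reports _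
  show part1 reports = part1_alt reports
  unfold part1 part1_alt
  exact foldl_eq reports 0
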